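-- pv_equiv track=rewrite | github.com/B664577/DocAvatar | docavatardev/docavatar_gradio.py | _split_by_kind
-- ===== SOURCE A (Python) =====
-- def _split_by_kind(items: list[tuple[int, str, str]], kind: str) -> list[list[tuple[int, str, str]]]:
--     segs: list[list[tuple[int, str, str]]] = []
--     cur: list[tuple[int, str, str]] = []
--     for it in items:
--         idx, txt, k = it
--         if k == kind:
--             if cur:
--                 segs.append(cur)
--             cur = [it]
--         else:
--             cur.append(it)
--     if cur:
--         segs.append(cur)
--     return segs
-- ===== SOURCE B (Python) =====
-- def _split_by_kind(items: list[tuple[int, str, str]], kind: str) -> list[list[tuple[int, str, str]]]: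
--     # Tail-first decomposition (a right fold, written iteratively): walk the
--     # items back to front; each head is merged into the front segment when that
--     # segment does not start at a kind-boundary, else it opens a new segment.
--     segs: list[list[tuple[int, str, str]]] = []
--     for head in reversed(items):
--         if segs and segs[0][0][2] != kind:
--             segs[0].insert(0, head)
--         else:
--             segs.insert(0, [head])
--     return segs
-- ===== Notes on version B (the rewrite author's own statement) =====
-- stated objective: alternative
-- what changed: Replaces A's forward accumulator (a current segment closed and reopened at each kind-match) with a right fold: items are consumed back to front and each item is either merged into the front segment or opens a new one, so no 'cur' buffer or final flush exists.
import Mathlib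
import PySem

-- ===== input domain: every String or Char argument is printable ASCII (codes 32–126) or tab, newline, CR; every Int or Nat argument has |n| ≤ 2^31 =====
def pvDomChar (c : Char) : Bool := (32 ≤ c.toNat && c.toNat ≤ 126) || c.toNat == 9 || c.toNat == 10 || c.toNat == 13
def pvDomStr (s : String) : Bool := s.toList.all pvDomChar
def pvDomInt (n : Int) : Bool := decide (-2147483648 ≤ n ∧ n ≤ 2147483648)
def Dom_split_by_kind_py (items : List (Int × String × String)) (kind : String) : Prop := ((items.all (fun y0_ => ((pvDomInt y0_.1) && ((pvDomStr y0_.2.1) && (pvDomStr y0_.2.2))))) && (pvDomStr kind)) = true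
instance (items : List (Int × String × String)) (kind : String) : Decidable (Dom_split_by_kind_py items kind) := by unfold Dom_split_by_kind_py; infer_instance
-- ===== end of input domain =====

-- B replaces A's forward accumulator loop by a right fold that merges or
-- prepends each item back to front; same result, different decomposition.

-- ===== PORT A =====
-- forward fold over items with state (segs, cur), exactly A's loop
def split_by_kind_py (items : List (Int × String × String)) (kind : String) : List (List (Int × String × String)) :=
  let st := items.foldl
    (fun (p : List (List (Int × String × String)) × List (Int × String × String)) it =>
      let segs := p.1
      let cur := p.2
      if it.2.2 = kind then
        ((if cur = [] then segs else segs ++ [cur]), [it])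
      else
        (segs, cur ++ [it]))
    ([], [])
  if st.2 = [] then st.1 else st.1 ++ [st.2]

-- ===== PORT B =====
-- Source B's right fold (a back-to-front loop): the head is merged into the front
-- segment when that segment does not start with a kind-match, else it opens a
-- new segment [head]; ported as the structural recursion this fold denotes.
-- (Source B indexes segs[0][0]; segments are never empty, so the `[] :: _` match
-- arm below is unreachable.)
def split_by_kind_py_alt (items : List (Int × String × String)) (kind : String) : List (List (Int × String × String)) :=
  match items with
  | [] => []
  | head :: rest =>
    match split_by_kind_py_alt rest kind with
    | (a :: s0) :: srest =>
        if a.2.2 ≠ kind then (head :: a :: s0) :: srest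
        else [head] :: (a :: s0) :: srest
    | other => [head] :: other

-- ===== PRECONDITION & SPEC =====
def Spec_split_by_kind_py (items : List (Int × String × String)) (kind : String) (out : List (List (Int × String × String))) : Prop := out = split_by_kind_py_alt items kind
instance (items : List (Int × String × String)) (kind : String) (out : List (List (Int × String × String))) : Decidable (Spec_split_by_kind_py items kind out) := by unfold Spec_split_by_kind_py; infer_instance

-- ===== CLAIM (what is proved, stated in full; the proofs are below) =====
def Claim_equal_split_by_kind_py : Prop := ∀ (items : List (Int × String × String)) (kind : String), Dom_split_by_kind_py items kind → Spec_split_by_kind_py items kind (split_by_kind_py items kind)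

-- ===== LEMMAS AND PROOFS =====

-- the leading run of non-kind items
def pvPr (kind : String) : List (Int × String × String) → List (Int × String × String)
  | [] => []
  | it :: ts => if it.2.2 = kind then [] else it :: pvPr kind ts

-- the segments that start at a kind-match
def pvCl (kind : String) : List (Int × String × String) → List (List (Int × String × String))
  | [] => []
  | it :: ts => if it.2.2 = kind then (it :: pvPr kind ts) :: pvCl kind ts else pvCl kind ts

theorem pvPr_head (kind : String) (ts : List (Int × String × String))
    (a : Int × String × String) (l : List (Int × String × String))
    (h : pvPr kind ts = a :: l) : ¬ a.2.2 = kind := by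
  induction ts with
  | nil => simp [pvPr] at h
  | cons it ts ih =>
      by_cases hk : it.2.2 = kind
      · simp [pvPr, hk] at h
      · simp [pvPr, hk] at h
        rw [← h.1]; exact hk

theorem pvCl_head (kind : String) (ts : List (Int × String × String))
    (s : List (Int × String × String)) (ss : List (List (Int × String × String)))
    (h : pvCl kind ts = s :: ss) :
    ∃ a l, s = a :: l ∧ a.2.2 = kind := by
  induction ts with
  | nil => simp [pvCl] at h
  | cons it ts ih =>
      by_cases hk : it.2.2 = kind
      · simp [pvCl, hk] at h
        exact ⟨it, pvPr kind ts, h.1.symm, hk⟩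
      · simp [pvCl, hk] at h
        exact ih h

theorem pvB_char (kind : String) (items : List (Int × String × String)) :
    split_by_kind_py_alt items kind
      = (if pvPr kind items = [] then [] else [pvPr kind items]) ++ pvCl kind items := by
  induction items with
  | nil => simp [split_by_kind_py_alt, pvPr, pvCl]
  | cons it ts ih =>
      rw [split_by_kind_py_alt, ih]
      by_cases hk : it.2.2 = kind
      · simp only [pvPr, pvCl, hk, ite_true]
        rcases hp : pvPr kind ts with _ | ⟨a, l⟩
        · simp only [ite_true, List.nil_append]
          rcases hc : pvCl kind ts with _ | ⟨s, ss⟩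
          · simp [hp]
          · obtain ⟨b, m, hs, hb⟩ := pvCl_head kind ts s ss hc
            subst hs
            simp [hb]
        · have hna := pvPr_head kind ts a l hp
          simp [hna]
      · simp only [pvPr, pvCl, hk, ite_false]
        rcases hp : pvPr kind ts with _ | ⟨a, l⟩
        · simp only [ite_true, List.nil_append]
          rcases hc : pvCl kind ts with _ | ⟨s, ss⟩
          · simp
          · obtain ⟨b, m, hs, hb⟩ := pvCl_head kind ts s ss hc
            subst hs
            simp [hb]
        · have hna := pvPr_head kind ts a l hp
          simp [hna]

theorem pvA_foldl (kind : String) (items : List (Int × String × String))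
    (segs : List (List (Int × String × String))) (cur : List (Int × String × String)) :
    (let st := items.foldl
        (fun (p : List (List (Int × String × String)) × List (Int × String × String)) it =>
          if it.2.2 = kind then
            ((if p.2 = [] then p.1 else p.1 ++ [p.2]), [it])
          else
            (p.1, p.2 ++ [it]))
        (segs, cur)
      if st.2 = [] then st.1 else st.1 ++ [st.2])
    = segs ++ (if cur ++ pvPr kind items = [] then [] else [cur ++ pvPr kind items]) ++ pvCl kind items := by
  induction items generalizing segs cur with
  | nil => simp [pvPr, pvCl]; by_cases h : cur = [] <;> simp [h]
  | cons it ts ih =>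
      simp only [List.foldl_cons, pvPr, pvCl]
      by_cases h : it.2.2 = kind
      · simp only [h, ite_true, ih]
        by_cases hc : cur = [] <;> simp [hc]
      · simp only [h, ite_false, ih]
        simp [List.append_assoc]

-- ===== VERDICT (by name: the statement is the Claim_ definition above) =====
theorem split_by_kind_py_spec : Claim_equal_split_by_kind_py := by
  intro items kind _
  unfold Spec_split_by_kind_py split_by_kind_py
  rw [pvB_char]
  have hA := pvA_foldl kind items [] []
  simp only [List.nil_append] at hA
  exact hA
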